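-- pv_equiv track=rewrite | github.com/NeethuAnna2003/Social-Media- | backend/videos/simple_ai_services.py | _translate_en_to_hi
-- ===== SOURCE A (Python) =====
-- def _translate_en_to_hi(text: str) -> str:
--     """English to Hindi"""
--     translations = {
--         'Welcome': 'स्वागत',
--         'Watch': 'देखें',
--         'Learn': 'सीखें',
--         'Video': 'वीडियो',
--         'More': 'अधिक',
--         'continues': 'जारी है',
--         'ending': 'समाप्त हो रहा है'
--     }
--
--     for en, hi in translations.items():
--         text = text.replace(en, hi)
--
--     return text
-- ===== SOURCE B (Python) =====
-- def _translate_en_to_hi(text: str) -> str: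
--     """English to Hindi"""
--     translations = {
--         'Welcome': 'स्वागत',
--         'Watch': 'देखें',
--         'Learn': 'सीखें',
--         'Video': 'वीडियो',
--         'More': 'अधिक',
--         'continues': 'जारी है',
--         'ending': 'समाप्त हो रहा है'
--     }
--
--     out = []
--     i = 0
--     n = len(text)
--     while i < n:
--         for en, hi in translations.items():
--             if text.startswith(en, i):
--                 out.append(hi)
--                 i += len(en)
--                 break
--         else:
--             out.append(text[i])
--             i += 1
--     return ''.join(out)
-- ===== Notes on version B (the rewrite author's own statement) =====
-- stated objective: alternative
-- what changed: A runs seven sequential full-text replace passes (one per dictionary entry); B makes a single left-to-right scan over the text, consulting the translation table at each position and emitting either a translation or the current character.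
import Mathlib
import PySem

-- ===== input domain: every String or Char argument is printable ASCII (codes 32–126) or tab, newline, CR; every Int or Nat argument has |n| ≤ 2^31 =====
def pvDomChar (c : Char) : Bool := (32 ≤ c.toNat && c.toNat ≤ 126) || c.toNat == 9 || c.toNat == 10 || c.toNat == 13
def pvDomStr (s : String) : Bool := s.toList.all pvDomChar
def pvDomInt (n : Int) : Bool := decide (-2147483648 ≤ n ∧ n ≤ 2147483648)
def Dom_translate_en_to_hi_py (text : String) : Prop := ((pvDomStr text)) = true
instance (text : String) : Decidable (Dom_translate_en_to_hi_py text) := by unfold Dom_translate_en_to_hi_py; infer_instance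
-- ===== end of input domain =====

-- B replaces A's seven sequential full-text replace passes by a single left-to-right
-- scan that consults the translation table at each position (objective: alternative).


-- ===== PORT A =====
def pvTranslationsA : PySem.Dict String String :=
  PySem.Dict.ofList
    [("Welcome", "स्वागत"), ("Watch", "देखें"), ("Learn", "सीखें"), ("Video", "वीडियो"),
     ("More", "अधिक"), ("continues", "जारी है"), ("ending", "समाप्त हो रहा है")]

def translate_en_to_hi_py (text : String) : String :=
  pvTranslationsA.items.foldl (fun t p => PySem.Str.replace t p.1 p.2) text

-- ===== PORT B =====
def pvTableB : List (List Char × List Char) :=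
  [("Welcome".toList, "स्वागत".toList), ("Watch".toList, "देखें".toList),
   ("Learn".toList, "सीखें".toList), ("Video".toList, "वीडियो".toList),
   ("More".toList, "अधिक".toList), ("continues".toList, "जारी है".toList),
   ("ending".toList, "समाप्त हो रहा है".toList)]

-- the inner 'for en, hi in translations.items(): if text.startswith(en, i): … break / else: …'
def pvFindMatch : List (List Char × List Char) → List Char → Option (List Char × Nat)
  | [], _ => none
  | (en, hi) :: rest, s => if en.isPrefixOf s then some (hi, en.length) else pvFindMatch rest s

-- the outer 'while i < n' loop: one pass, emitting either a translation or the current char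
def pvScanB (table : List (List Char × List Char)) (s : List Char) : List Char :=
  match s with
  | [] => []
  | c :: t =>
    match pvFindMatch table (c :: t) with
    | some (hi, n) => hi ++ pvScanB table (t.drop (n - 1))
    | none => c :: pvScanB table t
termination_by s.length
decreasing_by
  · simp only [List.length_cons, List.length_drop]
    omega
  · simp

def translate_en_to_hi_py_alt (text : String) : String :=
  String.ofList (pvScanB pvTableB text.toList)

-- ===== PRECONDITION & SPEC =====
def Spec_translate_en_to_hi_py (text : String) (out : String) : Prop := out = translate_en_to_hi_py_alt text
instance (text : String) (out : String) : Decidable (Spec_translate_en_to_hi_py text out) := by unfold Spec_translate_en_to_hi_py; infer_instance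

-- ===== CLAIM (what is proved, stated in full; the proofs are below) =====
def Claim_equal_translate_en_to_hi_py : Prop := ∀ (text : String), Dom_translate_en_to_hi_py text → Spec_translate_en_to_hi_py text (translate_en_to_hi_py text)

-- ===== LEMMAS AND PROOFS =====

-- model of PySem.Chars.replace for a nonempty pattern (head-step recursion)
def pvRep (old new : List Char) (s : List Char) : List Char :=
  match s with
  | [] => []
  | c :: t =>
    if old.isPrefixOf (c :: t) then new ++ pvRep old new (t.drop (old.length - 1))
    else c :: pvRep old new t
termination_by s.length
decreasing_by
  · simp only [List.length_cons, List.length_drop]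
    omega
  · simp

-- the sequential-replace composite, over the same table B scans with
def pvFoldRep (T : List (List Char × List Char)) (s : List Char) : List Char :=
  T.foldl (fun t e => pvRep e.1 e.2 t) s

-- each table entry: nonempty all-ASCII key, nonempty value starting with a non-ASCII char
def pvGood (T : List (List Char × List Char)) : Prop :=
  (T.all fun e => !e.1.isEmpty && e.1.all (fun c => decide (c.toNat < 128))
      && !e.2.isEmpty && !decide (e.2.headI.toNat < 128)) = true

-- k can never match at any position strictly inside u (for any continuation after u)
def pvNoClashB (k u : List Char) : Bool :=
  (List.range u.length).all fun p => !(k.isPrefixOf (u.drop p) || (u.drop p).isPrefixOf k)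

def pvNoClash (k u : List Char) : Prop := pvNoClashB k u = true

-- for entries a before b in the table: b's key never overlaps a's key region,
-- and b's key never overlaps a's replacement value
def pvOk (a b : List Char × List Char) : Prop := pvNoClash a.1 b.1 ∧ pvNoClash b.1 a.2

-- Bool check of the pairwise condition over the whole table
def pvOkAll : List (List Char × List Char) → Bool
  | [] => true
  | a :: T => T.all (fun b => pvNoClashB a.1 b.1 && pvNoClashB b.1 a.2) && pvOkAll T

theorem pvPairwise_of_okAll (T : List (List Char × List Char)) (h : pvOkAll T = true) :
    T.Pairwise pvOk := by
  induction T with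
  | nil => exact List.Pairwise.nil
  | cons a T' ih =>
    rw [pvOkAll, Bool.and_eq_true, List.all_eq_true] at h
    refine List.Pairwise.cons ?_ (ih h.2)
    intro b hb
    have h2 := h.1 b hb
    rw [Bool.and_eq_true] at h2
    exact ⟨h2.1, h2.2⟩

theorem pvNoClash_spec (k u : List Char) (h : pvNoClash k u) :
    ∀ p < u.length, ¬ k <+: u.drop p ∧ ¬ u.drop p <+: k := by
  intro p hp
  unfold pvNoClash pvNoClashB at h
  rw [List.all_eq_true] at h
  have h2 := h p (List.mem_range.mpr hp)
  simp only [Bool.not_eq_true', Bool.or_eq_false_iff] at h2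
  exact ⟨by simp [← List.isPrefixOf_iff_prefix, h2.1], by simp [← List.isPrefixOf_iff_prefix, h2.2]⟩

theorem pvGood_spec (T : List (List Char × List Char)) (h : pvGood T) :
    ∀ e ∈ T, e.1 ≠ [] ∧ (∀ c ∈ e.1, c.toNat < 128) ∧ e.2 ≠ [] ∧ ¬ (e.2.headI.toNat < 128) := by
  intro e he
  unfold pvGood at h
  rw [List.all_eq_true] at h
  have h2 := h e he
  simp only [Bool.and_eq_true, Bool.not_eq_true', List.isEmpty_eq_false_iff,
    List.all_eq_true, decide_eq_true_eq, decide_eq_false_iff_not] at h2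
  exact ⟨h2.1.1.1, h2.1.1.2, h2.1.2, h2.2⟩

theorem pvGood_tail (e : List Char × List Char) (T : List (List Char × List Char))
    (h : pvGood (e :: T)) : pvGood T := by
  unfold pvGood at h ⊢
  rw [List.all_eq_true] at h ⊢
  exact fun x hx => h x (List.mem_cons_of_mem e hx)

theorem pvGo_eq_rep (old new : List Char) (hold : old ≠ []) :
    ∀ fuel l acc, l.length ≤ fuel →
      PySem.Chars.replace.go old new fuel l acc = acc.reverse ++ pvRep old new l := by
  intro fuel
  induction fuel with
  | zero =>
    intro l acc hl
    have : l = [] := List.eq_nil_of_length_eq_zero (Nat.le_zero.mp hl)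
    subst this
    simp [PySem.Chars.replace.go, pvRep]
  | succ n ih =>
    intro l acc hl
    match l with
    | [] => simp [PySem.Chars.replace.go, pvRep]
    | c :: t =>
      rw [PySem.Chars.replace.go]
      by_cases h : old.isPrefixOf (c :: t)
      · simp only [h, if_true]
        have hne : old ≠ [] := hold
        have h1 : 1 ≤ old.length := List.length_pos_iff.mpr hne
        rw [ih (List.drop old.length (c :: t)) (new.reverse ++ acc)
              (by simp only [List.length_cons] at hl; simp only [List.length_drop, List.length_cons]; omega)]
        rw [pvRep, if_pos h]
        have hdrop : List.drop old.length (c :: t) = t.drop (old.length - 1) := by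
          cases old with
          | nil => exact absurd rfl hold
          | cons a o => simp
        rw [hdrop]
        simp
      · simp only [h]
        rw [ih t (c :: acc) (by simp only [List.length_cons] at hl; omega)]
        rw [pvRep, if_neg h]
        simp

theorem pvReplace_eq_rep (s old new : List Char) (hold : old ≠ []) :
    PySem.Chars.replace s old new = pvRep old new s := by
  rw [PySem.Chars.replace]
  rw [if_neg (by simpa using hold)]
  simpa using pvGo_eq_rep old new hold s.length s [] le_rfl

theorem pvRep_nil (old new : List Char) : pvRep old new [] = [] := by rw [pvRep]

-- pvRep passes over a block u that the pattern can never hit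
theorem pvRep_append (old new u X : List Char)
    (hu : ∀ p < u.length, ¬ old <+: u.drop p ∧ ¬ u.drop p <+: old) :
    pvRep old new (u ++ X) = u ++ pvRep old new X := by
  induction u with
  | nil => simp
  | cons a u' ih =>
    have h0 := hu 0 (by simp)
    simp only [List.drop_zero] at h0
    have hnp : ¬ old.isPrefixOf ((a :: u') ++ X) := by
      rw [List.isPrefixOf_iff_prefix]
      intro h
      rcases List.prefix_or_prefix_of_prefix h (List.prefix_append (a :: u') X) with h' | h'
      · exact h0.1 h'
      · exact h0.2 h'
    rw [List.cons_append, pvRep, if_neg (by simpa using hnp)]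
    simp only [List.cons_append]
    rw [ih (fun p hp => hu (p + 1) (by simpa using Nat.succ_lt_succ hp))]

-- pvRep when the pattern sits at the front
theorem pvRep_head_match (old new Z : List Char) (hold : old ≠ []) :
    pvRep old new (old ++ Z) = new ++ pvRep old new Z := by
  match old with
  | [] => exact absurd rfl hold
  | a :: o =>
    rw [List.cons_append, pvRep,
        if_pos (by rw [List.isPrefixOf_iff_prefix, ← List.cons_append]; exact List.prefix_append _ _)]
    simp

-- an all-ASCII prefix of a replacement result was already a prefix of the input
theorem pvPrefix_rep (old new : List Char) (hne : new ≠ []) (hd : ¬ new.headI.toNat < 128) :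
    ∀ s w, (∀ c ∈ w, c.toNat < 128) → w <+: pvRep old new s → w <+: s := by
  intro s
  induction hn : s.length using Nat.strong_induction_on generalizing s with
  | _ n ih =>
    match s with
    | [] =>
      intro w hw h
      rw [pvRep] at h
      exact h
    | c :: t =>
      intro w hw h
      rw [pvRep] at h
      by_cases hp : old.isPrefixOf (c :: t)
      · rw [if_pos hp] at h
        match w with
        | [] => exact List.nil_prefix
        | a :: w' =>
          match new, hne with
          | d :: v', _ =>
            rcases h with ⟨r, hr⟩
            simp only [List.cons_append, List.cons.injEq] at hr
            simp only [List.headI] at hd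
            exact absurd (hr.1 ▸ hw a (by simp)) hd
      · rw [if_neg hp] at h
        match w with
        | [] => exact List.nil_prefix
        | a :: w' =>
          rcases h with ⟨r, hr⟩
          simp only [List.cons_append, List.cons.injEq] at hr
          have h2 : w' <+: pvRep old new t := ⟨r, hr.2⟩
          have h3 := ih t.length (by subst hn; simp) t rfl w' (fun x hx => hw x (by simp [hx])) h2
          exact hr.1 ▸ List.cons_prefix_cons.mpr ⟨rfl, h3⟩

theorem pvFoldRep_nil (T : List (List Char × List Char)) : pvFoldRep T [] = [] := by
  induction T with
  | nil => rfl
  | cons e T' ih => simp only [pvFoldRep, List.foldl_cons, pvRep_nil] at ih ⊢; exact ih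

-- sequential replaces pass over a block none of the keys can hit
theorem pvFoldRep_block (T : List (List Char × List Char)) (u : List Char)
    (hu : ∀ e ∈ T, pvNoClash e.1 u) :
    ∀ X, pvFoldRep T (u ++ X) = u ++ pvFoldRep T X := by
  induction T with
  | nil => intro X; rfl
  | cons e T' ih =>
    intro X
    simp only [pvFoldRep, List.foldl_cons]
    rw [pvRep_append e.1 e.2 u X (pvNoClash_spec _ _ (hu e (by simp)))]
    exact ih (fun e' he' => hu e' (by simp [he'])) (pvRep e.1 e.2 X)

-- when no key matches at the head, every sequential replace peels the head char
theorem pvFoldRep_cons (T : List (List Char × List Char)) (hT : pvGood T) :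
    ∀ c t, (∀ e ∈ T, ¬ e.1 <+: c :: t) → pvFoldRep T (c :: t) = c :: pvFoldRep T t := by
  induction T with
  | nil => intro c t _; rfl
  | cons e T' ih =>
    intro c t hnp
    obtain ⟨-, hk, hv1, hv2⟩ := pvGood_spec _ hT e (by simp)
    have he : ¬ e.1.isPrefixOf (c :: t) := by
      rw [List.isPrefixOf_iff_prefix]; exact hnp e (by simp)
    have step : pvRep e.1 e.2 (c :: t) = c :: pvRep e.1 e.2 t := by
      rw [pvRep, if_neg he]
    simp only [pvFoldRep, List.foldl_cons]
    rw [step]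
    have hT' : pvGood T' := pvGood_tail e T' hT
    have hnp' : ∀ e' ∈ T', ¬ e'.1 <+: c :: pvRep e.1 e.2 t := by
      intro e' he' hpre
      obtain ⟨-, hk', -, -⟩ := pvGood_spec _ hT' e' he'
      have := pvPrefix_rep e.1 e.2 hv1 hv2 (c :: t) e'.1 hk' (step ▸ hpre)
      exact hnp e' (by simp [he']) this
    exact ih hT' c (pvRep e.1 e.2 t) hnp'

theorem pvFindMatch_none (T : List (List Char × List Char)) (s : List Char)
    (h : pvFindMatch T s = none) : ∀ e ∈ T, ¬ e.1 <+: s := by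
  induction T with
  | nil => intro e he; simp at he
  | cons e T' ih =>
    intro e' he'
    rw [pvFindMatch] at h
    by_cases hp : e.1.isPrefixOf s
    · simp [hp] at h
    · rcases List.mem_cons.mp he' with h1 | h1
      · subst h1; rw [List.isPrefixOf_iff_prefix] at hp; exact hp
      · simp only [hp] at h
        exact ih h e' h1

theorem pvFindMatch_some (T : List (List Char × List Char)) (s : List Char) (hi : List Char) (n : Nat)
    (h : pvFindMatch T s = some (hi, n)) :
    ∃ T1 en T2, T = T1 ++ (en, hi) :: T2 ∧ en <+: s ∧ n = en.length ∧ ∀ e ∈ T1, ¬ e.1 <+: s := by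
  induction T with
  | nil => simp [pvFindMatch] at h
  | cons e T' ih =>
    rw [pvFindMatch] at h
    by_cases hp : e.1.isPrefixOf s
    · simp only [hp, if_true, Option.some.injEq, Prod.mk.injEq] at h
      exact ⟨[], e.1, T', by simp [← h.1], List.isPrefixOf_iff_prefix.mp hp, h.2.symm, by simp⟩
    · simp only [hp] at h
      obtain ⟨T1, en, T2, hT, hpre, hn, hT1⟩ := ih h
      refine ⟨e :: T1, en, T2, by simp [hT], hpre, hn, ?_⟩
      intro e' he'
      rcases List.mem_cons.mp he' with h1 | h1
      · subst h1; rw [List.isPrefixOf_iff_prefix] at hp; exact hp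
      · exact hT1 e' h1

-- main: the sequential composite equals the single left-to-right scan
theorem pvScan_eq (T : List (List Char × List Char)) (hT : pvGood T)
    (hP : T.Pairwise pvOk) :
    ∀ (fuel : Nat) (s : List Char), s.length ≤ fuel → pvFoldRep T s = pvScanB T s := by
  intro fuel
  induction fuel with
  | zero =>
    intro s hs
    have : s = [] := List.eq_nil_of_length_eq_zero (Nat.le_zero.mp hs)
    subst this
    rw [pvFoldRep_nil, pvScanB]
  | succ m ih =>
    intro s hs
    match s with
    | [] => rw [pvFoldRep_nil, pvScanB]
    | c :: t =>
      rw [pvScanB]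
      cases hm : pvFindMatch T (c :: t) with
      | none =>
        have hnp := pvFindMatch_none T (c :: t) hm
        rw [pvFoldRep_cons T hT c t hnp]
        rw [ih t (by simp at hs; omega)]
      | some p =>
        obtain ⟨hi, n⟩ := p
        obtain ⟨T1, en, T2, hsplit, hpre, hn, hT1⟩ := pvFindMatch_some T (c :: t) hi n hm
        obtain ⟨rest, hrest⟩ := hpre
        have hmem : (en, hi) ∈ T := by rw [hsplit]; exact List.mem_append_right _ (by simp)
        obtain ⟨hen, -, hhi, -⟩ := pvGood_spec _ hT (en, hi) hmem
        rw [hsplit] at hP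
        rw [List.pairwise_append] at hP
        have hC1 : ∀ e ∈ T1, pvNoClash e.1 en :=
          fun e he => (hP.2.2 e he (en, hi) (by simp)).1
        have hC2 : ∀ e ∈ T2, pvNoClash e.1 hi :=
          fun e he => ((List.pairwise_cons.mp hP.2.1).1 e he).2
        have hfold : ∀ s0 : List Char,
            pvFoldRep T s0 = pvFoldRep T2 (pvRep en hi (pvFoldRep T1 s0)) := by
          intro s0
          rw [hsplit]
          simp [pvFoldRep, List.foldl_append]
        have hstep : pvFoldRep T (c :: t) = hi ++ pvFoldRep T rest := by
          rw [← hrest, hfold, pvFoldRep_block T1 en hC1 rest,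
              pvRep_head_match en hi _ hen, pvFoldRep_block T2 hi hC2, ← hfold]
        -- identify the scan's continuation with rest
        match en, hen, hrest with
        | e0 :: en', _, hrest =>
          have hc : c = e0 ∧ t = en' ++ rest := by
            have h' := hrest.symm
            simp only [List.cons_append, List.cons.injEq] at h'
            exact h'
          have hdrop : t.drop (n - 1) = rest := by
            rw [hc.2, hn]
            simp only [List.length_cons, Nat.add_sub_cancel]
            exact List.drop_left
          rw [hstep]
          show hi ++ pvFoldRep T rest = hi ++ pvScanB T (List.drop (n - 1) t)
          have hlen : rest.length ≤ m := by
            have := congrArg List.length hrest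
            simp only [List.length_append, List.length_cons] at this hs
            omega
          rw [hdrop, ih rest hlen]

-- A's fold of Str.replace over the dict items, pushed down to the char level
theorem pvFoldA (L : List (String × String)) :
    ∀ s : String, (∀ p ∈ L, p.1.toList ≠ []) →
      L.foldl (fun t p => PySem.Str.replace t p.1 p.2) s
        = String.ofList (pvFoldRep (L.map (fun p => (p.1.toList, p.2.toList))) s.toList) := by
  induction L with
  | nil => intro s _; simp [pvFoldRep]
  | cons p L' ih =>
    intro s hL
    simp only [List.foldl_cons, List.map_cons]
    rw [ih _ (fun q hq => hL q (by simp [hq]))]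
    have : PySem.Str.replace s p.1 p.2 = String.ofList (pvRep p.1.toList p.2.toList s.toList) := by
      rw [PySem.Str.replace, pvReplace_eq_rep _ _ _ (hL p (by simp))]
    rw [this]
    simp [pvFoldRep]

-- ===== VERDICT (by name: the statement is the Claim_ definition above) =====
theorem translate_en_to_hi_py_spec : Claim_equal_translate_en_to_hi_py := by
  intro text _
  unfold Spec_translate_en_to_hi_py translate_en_to_hi_py translate_en_to_hi_py_alt
  rw [pvFoldA pvTranslationsA.items text (by decide)]
  have htab : pvTranslationsA.items.map (fun p => (p.1.toList, p.2.toList)) = pvTableB := by decide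
  rw [htab, pvScan_eq pvTableB (by rfl) (pvPairwise_of_okAll pvTableB (by rfl))
        text.toList.length text.toList le_rfl]
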